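-- pv_equiv track=rewrite | github.com/JoshuaGraham14/indexer-search-tool | find_and_rank.py | find_exact_phrase_matches
-- ===== SOURCE A (Python) =====
-- def find_exact_phrase_matches(inverted_index, query_words):
--     #Check first word exists; If not, don't even bother checking.
--     first_word =query_words[0]
--     remaining_words = query_words[1:]
--     if first_word not in inverted_index: return []
--
--     scores = {}
--     # Loop trhough each page where the first word exists...
--     for url, first_word_positions in inverted_index[first_word].items():
--         for pos in first_word_positions:
--             match_found = True
--
--             #Given we have a first word, loop through each remaining word and check if they appear all in correct position...
--             for i in range(len(remaining_words)):
--                 word = query_words[i+1]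
--
--                 #Must check all this:
--                 #1: the next remaining_word exists in the inverted_index
--                 #2: the next remaining_word exists in the same current URL
--                 #3: the next remaining_word is at the next position
--                 if (
--                     word not in inverted_index or
--                     url not in inverted_index[word] or
--                     (pos+i+1) not in inverted_index[word][url]
--                 ):
--                     match_found = False
--                     break
--
--             if match_found:
--                 #add 1 to score for that url (i.e. number of exact phrases encountered in that url):
--                 scores[url] = scores.get(url, 0) + 1
--
--     # Sort by score
--     scores = sorted(scores.items(), key=lambda item: item[1], reverse=True)
--     return scores
-- ===== SOURCE B (Python) =====
-- def find_exact_phrase_matches(inverted_index, query_words):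
--     first_word = query_words[0]
--     url_map = inverted_index.get(first_word)
--     if url_map is None:
--         return []
--     # Precompute, once per remaining word, its url->positions dict together with
--     # the shift offset; per url we intersect the shifted position SETS, so the
--     # per-position check of A's inner loops disappears.
--     shifted = [(offset, inverted_index.get(word, {}))
--                for offset, word in enumerate(query_words[1:], start=1)]
--     scores = []
--     for url, first_positions in url_map.items():
--         common = None
--         for offset, wmap in shifted:
--             ps = wmap.get(url)
--             if ps is None:
--                 common = set()
--                 break
--             s = {p - offset for p in ps}
--             common = s if common is None else (common & s)
--         if common is None:
--             count = len(first_positions)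
--         else:
--             count = sum(1 for p in first_positions if p in common)
--         if count:
--             scores.append((url, count))
--     scores.sort(key=lambda item: item[1], reverse=True)
--     return scores
-- ===== Notes on version B (the rewrite author's own statement) =====
-- stated objective: alternative
-- what changed: A re-scans every remaining word's position list for every occurrence of the first word; B instead computes, once per url, the intersection of the remaining words' position sets shifted by their phrase offset and counts first-word occurrences inside it, trading per-occurrence list scans for set construction and O(1) membership (not measurably faster on the benchmark inputs).
import Mathlib
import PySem

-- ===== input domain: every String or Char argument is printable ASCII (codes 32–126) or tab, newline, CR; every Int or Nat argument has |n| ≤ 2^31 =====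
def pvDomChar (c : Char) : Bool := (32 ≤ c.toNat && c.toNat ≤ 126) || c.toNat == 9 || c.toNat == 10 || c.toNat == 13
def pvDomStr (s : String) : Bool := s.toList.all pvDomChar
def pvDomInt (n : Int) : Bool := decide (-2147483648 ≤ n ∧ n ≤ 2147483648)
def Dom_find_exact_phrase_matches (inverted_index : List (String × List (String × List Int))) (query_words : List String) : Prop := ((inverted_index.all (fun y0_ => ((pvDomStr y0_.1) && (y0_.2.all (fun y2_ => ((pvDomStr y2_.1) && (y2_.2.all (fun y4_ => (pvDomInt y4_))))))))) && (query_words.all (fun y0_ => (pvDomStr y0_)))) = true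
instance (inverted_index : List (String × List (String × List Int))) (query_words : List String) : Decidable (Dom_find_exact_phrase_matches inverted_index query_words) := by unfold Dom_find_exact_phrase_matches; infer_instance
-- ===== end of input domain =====

-- B replaces A's per-position, per-word list scans by per-url intersection of shifted position
-- sets (objective: alternative — a set-intersection formulation of the same phrase count).


-- ===== PORT A =====

-- A's inner 'for i in range(len(remaining_words))' loop with its break: returns match_found.
def pvCheckA (inverted_index : List (String × List (String × List Int))) (query_words : List String)
    (url : String) (pos : Int) : List Int → Bool
  | [] => true
  | i :: rest =>
    -- word = query_words[i+1]; i ∈ range(len(remaining_words)), so the index is in range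
    let word := (PySem.List.pyGet? query_words (i + 1)).getD ""
    match (PySem.Dict.mk inverted_index).get? word with
    | none => false          -- word not in inverted_index → match_found = False, break
    | some wmap =>
      match (PySem.Dict.mk wmap).get? url with
      | none => false        -- url not in inverted_index[word] → break
      | some plist =>
        if plist.contains (pos + i + 1) then
          pvCheckA inverted_index query_words url pos rest
        else false           -- (pos+i+1) not in inverted_index[word][url] → break

def find_exact_phrase_matches (inverted_index : List (String × List (String × List Int))) (query_words : List String) : List (String × Int) :=
  match PySem.List.pyGet? query_words 0 with
  | none => []               -- query_words[0] raises IndexError; excluded by Pre_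
  | some first_word =>
    let remaining_words := PySem.List.slice query_words (some 1) none
    match (PySem.Dict.mk inverted_index).get? first_word with
    | none => []             -- 'if first_word not in inverted_index: return []'
    | some inner =>
      let scores : PySem.Dict String Int :=
        inner.foldl (fun scores uv =>
          uv.2.foldl (fun scores pos =>
            if pvCheckA inverted_index query_words uv.1 pos
                (PySem.List.pyRange 0 (PySem.List.len remaining_words) 1) then
              scores.insert uv.1 (scores.getD uv.1 0 + 1)
            else scores) scores) PySem.Dict.empty
      PySem.List.sorted scores.items (fun item => item.2) true

-- ===== PORT B =====

-- shifted = [(offset, inverted_index.get(word, {})) for offset, word in enumerate(query_words[1:], 1)]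
def pvShifted (inverted_index : List (String × List (String × List Int))) (query_words : List String) :
    List (Int × List (String × List Int)) :=
  (PySem.List.enumerate (PySem.List.slice query_words (some 1) none) 1).map
    (fun ow => (ow.1, (PySem.Dict.mk inverted_index).getD ow.2 []))

-- the per-url 'for offset, wmap in shifted' loop with its break, building 'common'
def pvCommonB (url : String) : List (Int × List (String × List Int)) → Option (PySem.Set Int) → Option (PySem.Set Int)
  | [], common => common
  | ow :: rest, common =>
    match (PySem.Dict.mk ow.2).get? url with
    | none => some PySem.Set.empty      -- common = set(); break
    | some ps =>
      let s : PySem.Set Int := PySem.Set.ofList (ps.map (fun p => p - ow.1))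
      match common with
      | none => pvCommonB url rest (some s)
      | some c => pvCommonB url rest (some (c.inter s))

-- count = len(first_positions) if common is None else sum(1 for p in first_positions if p in common)
def pvCountB (shifted : List (Int × List (String × List Int))) (uv : String × List Int) : Int :=
  match pvCommonB uv.1 shifted none with
  | none => PySem.List.len uv.2                               -- no remaining words
  | some c => (uv.2.countP (fun p => c.contains p) : Int)     -- sum(1 for p in first_positions if p in common)

def find_exact_phrase_matches_alt (inverted_index : List (String × List (String × List Int))) (query_words : List String) : List (String × Int) :=
  match PySem.List.pyGet? query_words 0 with
  | none => []               -- B's query_words[0] raises IndexError too; excluded by Pre_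
  | some first_word =>
    match (PySem.Dict.mk inverted_index).get? first_word with
    | none => []
    | some url_map =>
      let shifted := pvShifted inverted_index query_words
      let scores := url_map.foldl (fun scores uv =>
        let count : Int := pvCountB shifted uv
        if count ≠ 0 then scores ++ [(uv.1, count)] else scores) []
      PySem.List.sorted scores (fun item => item.2) true

-- ===== PRECONDITION & SPEC =====
-- Pre_ excludes empty query_words, on which A raises IndexError, and association lists carrying a
-- duplicate url key inside some word's inner dict — such lists cannot arise from a Python dict, so
-- A's dict-accumulation behaviour on them is accidental.
def Pre_find_exact_phrase_matches (inverted_index : List (String × List (String × List Int))) (query_words : List String) : Prop :=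
  query_words ≠ [] ∧ ∀ p ∈ inverted_index, (p.2.map Prod.fst).Nodup
instance (inverted_index : List (String × List (String × List Int))) (query_words : List String) : Decidable (Pre_find_exact_phrase_matches inverted_index query_words) := by unfold Pre_find_exact_phrase_matches; infer_instance

def pvWitness_find_exact_phrase_matches : (List (String × List (String × List Int))) × List String :=
  ([("a", [("u", [0, 3]), ("v", [2])]), ("b", [("u", [1]), ("v", [3])])], ["a", "b"])

def Spec_find_exact_phrase_matches (inverted_index : List (String × List (String × List Int))) (query_words : List String) (out : List (String × Int)) : Prop := out = find_exact_phrase_matches_alt inverted_index query_words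
instance (inverted_index : List (String × List (String × List Int))) (query_words : List String) (out : List (String × Int)) : Decidable (Spec_find_exact_phrase_matches inverted_index query_words out) := by unfold Spec_find_exact_phrase_matches; infer_instance

-- ===== CLAIM (what is proved, stated in full; the proofs are below) =====
def Claim_equal_find_exact_phrase_matches : Prop := ∀ (inverted_index : List (String × List (String × List Int))) (query_words : List String), Dom_find_exact_phrase_matches inverted_index query_words → Pre_find_exact_phrase_matches inverted_index query_words → Spec_find_exact_phrase_matches inverted_index query_words (find_exact_phrase_matches inverted_index query_words)

-- ===== LEMMAS AND PROOFS =====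

-- the per-word condition A's inner loop checks at index i
def pvCondA (inverted_index : List (String × List (String × List Int))) (query_words : List String)
    (url : String) (pos i : Int) : Prop :=
  ∃ wmap plist, (PySem.Dict.mk inverted_index).get? ((PySem.List.pyGet? query_words (i + 1)).getD "") = some wmap ∧
    (PySem.Dict.mk wmap).get? url = some plist ∧ (pos + i + 1) ∈ plist

-- the per-entry condition B's common-set loop enforces
def pvCondB (url : String) (ow : Int × List (String × List Int)) (x : Int) : Prop :=
  ∃ ps, (PySem.Dict.mk ow.2).get? url = some ps ∧ x + ow.1 ∈ ps

theorem pvCheckA_iff (ii : List (String × List (String × List Int))) (qw : List String)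
    (url : String) (pos : Int) (rng : List Int) :
    pvCheckA ii qw url pos rng = true ↔ ∀ i ∈ rng, pvCondA ii qw url pos i := by
  induction rng with
  | nil => simp [pvCheckA]
  | cons i rest ih =>
    rw [pvCheckA, List.forall_mem_cons]
    cases hg : (PySem.Dict.mk ii).get? ((PySem.List.pyGet? qw (i + 1)).getD "") with
    | none =>
      simp only [Bool.false_eq_true, false_iff, not_and]
      intro h
      rw [pvCondA] at h
      obtain ⟨w, p, hw, -⟩ := h
      rw [hg] at hw; exact absurd hw (by simp)
    | some wmap =>
      cases hu : (PySem.Dict.mk wmap).get? url with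
      | none =>
        simp only [hu, Bool.false_eq_true, false_iff, not_and]
        intro h _
        rw [pvCondA] at h
        obtain ⟨w, p, hw, hp, -⟩ := h
        rw [hg] at hw
        obtain rfl := Option.some.injEq .. ▸ hw
        rw [hu] at hp; exact absurd hp (by simp)
      | some plist =>
        simp only [hu]
        by_cases hc : (pos + i + 1) ∈ plist
        · rw [if_pos (by simpa using hc), ih]
          constructor
          · exact fun h => ⟨⟨wmap, plist, hg, hu, hc⟩, h⟩
          · exact fun h => h.2
        · rw [if_neg (by simpa using hc)]
          simp only [Bool.false_eq_true, false_iff, not_and]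
          intro h
          rw [pvCondA] at h
          obtain ⟨w, p, hw, hp, hm⟩ := h
          rw [hg] at hw
          obtain rfl := Option.some.injEq .. ▸ hw
          rw [hu] at hp
          obtain rfl := Option.some.injEq .. ▸ hp
          exact fun _ => hc hm

theorem pvCommonB_some (url : String) (sh : List (Int × List (String × List Int))) (c : PySem.Set Int) :
    ∃ r, pvCommonB url sh (some c) = some r ∧
      ∀ x, x ∈ r ↔ x ∈ c ∧ ∀ ow ∈ sh, pvCondB url ow x := by
  induction sh generalizing c with
  | nil => exact ⟨c, rfl, by simp⟩
  | cons ow rest ih =>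
    rw [pvCommonB]
    cases hu : (PySem.Dict.mk ow.2).get? url with
    | none =>
      refine ⟨PySem.Set.empty, rfl, fun x => iff_of_false (by simp [PySem.Set.empty]) ?_⟩
      rintro ⟨-, hall⟩
      have h1 := hall ow (List.mem_cons_self ..)
      rw [pvCondB] at h1
      obtain ⟨ps, hps, -⟩ := h1
      rw [hu] at hps; exact absurd hps (by simp)
    | some ps =>
      obtain ⟨r, hr, hmem⟩ := ih (c.inter (PySem.Set.ofList (ps.map (fun p => p - ow.1))))
      refine ⟨r, hr, fun x => ?_⟩
      rw [hmem x, PySem.Set.mem_inter, PySem.Set.mem_ofList, List.forall_mem_cons]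
      constructor
      · rintro ⟨⟨hc, hm⟩, hrest⟩
        obtain ⟨p, hp, rfl⟩ := List.mem_map.mp hm
        exact ⟨hc, ⟨ps, hu, by simpa using hp⟩, hrest⟩
      · rintro ⟨hc, ⟨ps', hps', hm⟩, hrest⟩
        rw [hu] at hps'
        obtain rfl := Option.some.injEq .. ▸ hps'
        exact ⟨⟨hc, List.mem_map.mpr ⟨x + ow.1, hm, by ring⟩⟩, hrest⟩

theorem pvCommonB_cons (url : String) (ow : Int × List (String × List Int))
    (rest : List (Int × List (String × List Int))) :
    ∃ r, pvCommonB url (ow :: rest) none = some r ∧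
      ∀ x, x ∈ r ↔ ∀ ow' ∈ ow :: rest, pvCondB url ow' x := by
  rw [pvCommonB]
  cases hu : (PySem.Dict.mk ow.2).get? url with
  | none =>
    refine ⟨PySem.Set.empty, rfl, fun x => iff_of_false (by simp [PySem.Set.empty]) ?_⟩
    intro hall
    have h1 := hall ow (List.mem_cons_self ..)
    rw [pvCondB] at h1
    obtain ⟨ps, hps, -⟩ := h1
    rw [hu] at hps; exact absurd hps (by simp)
  | some ps =>
    obtain ⟨r, hr, hmem⟩ := pvCommonB_some url rest (PySem.Set.ofList (ps.map (fun p => p - ow.1)))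
    refine ⟨r, hr, fun x => ?_⟩
    rw [hmem x, PySem.Set.mem_ofList, List.forall_mem_cons]
    constructor
    · rintro ⟨hm, hrest⟩
      obtain ⟨p, hp, rfl⟩ := List.mem_map.mp hm
      exact ⟨⟨ps, hu, by simpa using hp⟩, hrest⟩
    · rintro ⟨⟨ps', hps', hm⟩, hrest⟩
      rw [hu] at hps'
      obtain rfl := Option.some.injEq .. ▸ hps'
      exact ⟨List.mem_map.mpr ⟨x + ow.1, hm, by ring⟩, hrest⟩

-- bridge: A's indexed condition at i = k is B's condition on the k-th shifted entry
theorem pvCond_bridge (ii : List (String × List (String × List Int))) (q0 : String) (qt : List String)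
    (url : String) (pos : Int) (k : Nat) (hk : k < qt.length) :
    pvCondA ii (q0 :: qt) url pos k ↔
      pvCondB url ((k : Int) + 1, (PySem.Dict.mk ii).getD qt[k] []) pos := by
  have hget : (PySem.List.pyGet? (q0 :: qt) ((k : Int) + 1)).getD "" = qt[k] := by
    rw [PySem.List.pyGet?_cons_succ, PySem.List.pyGet?_natCast]
    simp [hk]
  rw [pvCondA, pvCondB, hget]
  cases hg : (PySem.Dict.mk ii).get? qt[k] with
  | none =>
    have hgd : (PySem.Dict.mk ii).getD qt[k] [] = [] := by
      rw [PySem.Dict.getD_eq_get?_getD, hg]; rfl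
    constructor
    · rintro ⟨w, p, hw, -⟩
      exact absurd hw (by simp)
    · rintro ⟨ps, hps, -⟩
      rw [hgd] at hps
      exact absurd hps (by simp [show (PySem.Dict.mk ([] : List (String × List Int))).get? url = none from rfl])
  | some w =>
    have hgd : (PySem.Dict.mk ii).getD qt[k] [] = w := by
      rw [PySem.Dict.getD_eq_get?_getD, hg]; rfl
    rw [hgd]
    constructor
    · rintro ⟨wmap, plist, hw, hp, hm⟩
      injection hw with hww
      subst hww
      exact ⟨plist, hp, by rwa [← add_assoc]⟩
    · rintro ⟨ps, hps, hm⟩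
      exact ⟨w, ps, rfl, hps, by rwa [add_assoc]⟩

theorem pvCount_eq (ii : List (String × List (String × List Int))) (q0 : String) (qt : List String)
    (uv : String × List Int) :
    pvCountB (pvShifted ii (q0 :: qt)) uv =
    (uv.2.countP (fun pos => pvCheckA ii (q0 :: qt) uv.1 pos
        (PySem.List.pyRange 0 (PySem.List.len (PySem.List.slice (q0 :: qt) (some 1) none)) 1)) : Int) := by
  have hsl : PySem.List.slice (q0 :: qt) (some 1) none = qt := by
    simpa using PySem.List.slice_from_one (q0 :: qt)
  rw [pvCountB, pvShifted, hsl]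
  cases qt with
  | nil =>
    have : PySem.List.pyRange 0 (PySem.List.len ([] : List String)) 1 = [] := by
      simp [PySem.List.len_eq]
    rw [this]
    simp [PySem.List.enumerate, pvCommonB, PySem.List.len_eq, pvCheckA, List.countP_true]
  | cons w ws =>
    rw [PySem.List.enumerate_cons, List.map_cons]
    obtain ⟨r, hr, hmem⟩ := pvCommonB_cons uv.1
      ((1 : Int), (PySem.Dict.mk ii).getD w [])
      ((PySem.List.enumerate ws (1 + 1)).map
        (fun ow => (ow.1, (PySem.Dict.mk ii).getD ow.2 [])))
    simp only [hr]
    congr 1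
    apply List.countP_congr
    intro pos _
    have hA : (pvCheckA ii (q0 :: w :: ws) uv.1 pos
        (PySem.List.pyRange 0 (PySem.List.len (w :: ws)) 1) = true) ↔
        ∀ (k : Nat) (hk : k < (w :: ws).length), pvCondA ii (q0 :: w :: ws) uv.1 pos k := by
      rw [pvCheckA_iff]
      constructor
      · intro h k hk
        exact h k (PySem.List.mem_pyRange_one.mpr
          ⟨by positivity, by rw [PySem.List.len_eq]; exact_mod_cast hk⟩)
      · intro h i hi
        obtain ⟨hi0, hin⟩ := PySem.List.mem_pyRange_one.mp hi
        lift i to Nat using hi0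
        exact h i (by rw [PySem.List.len_eq] at hin; exact_mod_cast hin)
    have hB : pos ∈ r ↔
        ∀ (k : Nat) (hk : k < (w :: ws).length),
          pvCondB uv.1 ((k : Int) + 1, (PySem.Dict.mk ii).getD (w :: ws)[k] []) pos := by
      rw [hmem pos]
      rw [show ((1 : Int), (PySem.Dict.mk ii).getD w []) ::
            (PySem.List.enumerate ws (1 + 1)).map
              (fun ow => (ow.1, (PySem.Dict.mk ii).getD ow.2 [])) =
          (PySem.List.enumerate (w :: ws) 1).map
            (fun ow => (ow.1, (PySem.Dict.mk ii).getD ow.2 [])) from by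
        rw [PySem.List.enumerate_cons, List.map_cons]]
      rw [List.forall_mem_iff_forall_getElem]
      constructor
      · intro h k hk
        have hk' : k < ((PySem.List.enumerate (w :: ws) 1).map
            (fun ow => (ow.1, (PySem.Dict.mk ii).getD ow.2 []))).length := by
          simpa [PySem.List.length_enumerate] using hk
        have := h k hk'
        rwa [List.getElem_map, PySem.List.getElem_enumerate, add_comm (1 : Int)] at this
      · intro h k hk
        have hk2 : k < (w :: ws).length := by
          simpa [PySem.List.length_enumerate] using hk
        have := h k hk2
        rwa [List.getElem_map, PySem.List.getElem_enumerate, add_comm (1 : Int)]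
    have hcb : (r.contains pos = true) ↔ pos ∈ r := List.contains_iff_mem
    rw [hcb, hA, hB]
    exact forall_congr' fun k => forall_congr' fun hk => (pvCond_bridge ii q0 (w :: ws) uv.1 pos k hk).symm

-- get? of a dict whose only entry with key url sits at the end
theorem pvGet?_append_end {ν : Type} (url : String) (v : ν) (pre : List (String × ν))
    (h : ∀ p ∈ pre, p.1 ≠ url) :
    (PySem.Dict.mk (pre ++ [(url, v)])).get? url = some v := by
  induction pre with
  | nil => simp [PySem.Dict.get?_mk_cons]
  | cons p ps ih =>
    rw [List.cons_append, PySem.Dict.get?_mk_cons]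
    rw [if_neg (by simpa using (h p (List.mem_cons_self ..)))]
    exact ih (fun q hq => h q (List.mem_cons_of_mem _ hq))

-- url is a key of a dict that ends with (url, v)
theorem pvContains_append_end {ν : Type} (url : String) (v : ν) (pre : List (String × ν)) :
    (PySem.Dict.mk (pre ++ [(url, v)])).contains url = true := by
  rw [PySem.Dict.contains_iff_mem_keys, PySem.Dict.keys_mk]
  simp

-- entries of a dict that does not contain url all have other keys
theorem pvKeys_ne_of_not_contains {ν : Type} (url : String) (d : PySem.Dict String ν)
    (h : d.contains url = false) : ∀ p ∈ d.items, p.1 ≠ url := by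
  intro p hp hpe
  rw [← Bool.not_eq_true, PySem.Dict.contains_iff_mem_keys] at h
  exact h (hpe ▸ List.mem_map_of_mem hp)

-- A's position loop, once url is already the last key of scores
theorem pvFoldA_at_end (url : String) (chk : Int → Bool) (fwp : List Int)
    (pre : List (String × Int)) (v : Int) (h : ∀ p ∈ pre, p.1 ≠ url) :
    fwp.foldl (fun sc pos => if chk pos then sc.insert url (sc.getD url 0 + 1) else sc)
        (PySem.Dict.mk (pre ++ [(url, v)]))
      = PySem.Dict.mk (pre ++ [(url, v + (fwp.countP chk : Int))]) := by
  induction fwp generalizing v with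
  | nil => simp
  | cons pos rest ih =>
    rw [List.foldl_cons]
    by_cases hc : chk pos
    · rw [if_pos hc]
      have hgd : (PySem.Dict.mk (pre ++ [(url, v)])).getD url 0 = v := by
        rw [PySem.Dict.getD_eq_get?_getD, pvGet?_append_end url v pre h]; rfl
      have hd : (PySem.Dict.mk (pre ++ [(url, v)])).insert url
          ((PySem.Dict.mk (pre ++ [(url, v)])).getD url 0 + 1) = PySem.Dict.mk (pre ++ [(url, v + 1)]) := by
        apply PySem.Dict.ext
        rw [hgd, PySem.Dict.items_insert_of_contains _ _ (pvContains_append_end url v pre)]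
        show List.map _ (pre ++ [(url, v)]) = _
        rw [List.map_append]
        congr 1
        · exact (List.map_congr_left (fun p hp => by
            rw [if_neg (by simpa using h p hp)]; rfl)).trans (List.map_id _)
        · simp
      rw [hd, ih (v + 1), List.countP_cons_of_pos hc]
      congr 2
      push_cast; ring
    · rw [if_neg hc, ih v, List.countP_cons_of_neg (by simpa using hc)]

-- A's position loop from a dict not containing url
theorem pvFoldA_fresh (url : String) (chk : Int → Bool) (fwp : List Int)
    (d : PySem.Dict String Int) (h : d.contains url = false) :
    fwp.foldl (fun sc pos => if chk pos then sc.insert url (sc.getD url 0 + 1) else sc) d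
      = PySem.Dict.mk (d.items ++
          (if fwp.countP chk = 0 then [] else [(url, (fwp.countP chk : Int))])) := by
  induction fwp with
  | nil => simp
  | cons pos rest ih =>
    rw [List.foldl_cons]
    by_cases hc : chk pos
    · rw [if_pos hc]
      have hd : d.insert url (d.getD url 0 + 1) = PySem.Dict.mk (d.items ++ [(url, 1)]) := by
        apply PySem.Dict.ext
        rw [PySem.Dict.getD_of_not_contains _ _ h, PySem.Dict.items_insert_of_not_contains _ _ h]
        norm_num
      rw [hd, pvFoldA_at_end url chk rest d.items 1 (pvKeys_ne_of_not_contains url d h),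
        List.countP_cons_of_pos hc]
      rw [if_neg (by omega)]
      congr 3
      push_cast; ring
    · rw [if_neg hc, List.countP_cons_of_neg (by simpa using hc)]
      exact ih

-- A's url loop vs B's score-list loop
theorem pvFoldOuter (cnt : String × List Int → Int) (chk : String → Int → Bool)
    (l : List (String × List Int)) (hnd : (l.map Prod.fst).Nodup)
    (hcnt : ∀ uv ∈ l, cnt uv = (uv.2.countP (chk uv.1) : Int))
    (d : PySem.Dict String Int) (hdisj : ∀ uv ∈ l, d.contains uv.1 = false) :
    (l.foldl (fun sc uv =>
        uv.2.foldl (fun sc pos => if chk uv.1 pos then sc.insert uv.1 (sc.getD uv.1 0 + 1) else sc) sc) d).items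
      = d.items ++ l.foldl (fun sc uv => if cnt uv ≠ 0 then sc ++ [(uv.1, cnt uv)] else sc) [] := by
  induction l generalizing d with
  | nil => simp
  | cons uv l' ih =>
    rw [List.foldl_cons, List.foldl_cons,
      pvFoldA_fresh uv.1 (chk uv.1) uv.2 d (hdisj uv (List.mem_cons_self ..))]
    have hsfx : (if uv.2.countP (chk uv.1) = 0 then ([] : List (String × Int))
          else [(uv.1, (uv.2.countP (chk uv.1) : Int))])
        = (if cnt uv ≠ 0 then [(uv.1, cnt uv)] else []) := by
      rw [hcnt uv (List.mem_cons_self ..)]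
      by_cases h0 : uv.2.countP (chk uv.1) = 0
      · rw [if_pos h0, if_neg (by simp [h0])]
      · rw [if_neg h0, if_pos (by simpa using h0)]
    have h1 := List.nodup_cons.mp (show (uv.1 :: l'.map Prod.fst).Nodup by simpa using hnd)
    rw [ih h1.2 (fun w hw => hcnt w (List.mem_cons_of_mem _ hw))
        (PySem.Dict.mk (d.items ++ _))
        (fun w hw => ?_)]
    · show _ ++ _ = _ ++ List.foldl _ (if cnt uv ≠ 0 then [] ++ [(uv.1, cnt uv)] else []) l'
      rw [PySem.List.foldl_append_ite (fun uv => cnt uv ≠ 0) (fun uv => (uv.1, cnt uv)) l'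
          (if cnt uv ≠ 0 then [] ++ [(uv.1, cnt uv)] else []),
        PySem.List.foldl_append_ite (fun uv => cnt uv ≠ 0) (fun uv => (uv.1, cnt uv)) l' []]
      show (d.items ++ _) ++ _ = _
      rw [List.append_assoc, hsfx]
      simp
    · -- the freshly extended dict still misses the keys of l'
      rw [← Bool.not_eq_true, PySem.Dict.contains_iff_mem_keys, PySem.Dict.keys_mk,
        List.map_append, List.mem_append]
      rintro (hin | hin)
      · exact absurd ((PySem.Dict.contains_iff_mem_keys d w.1).mpr hin)
          (by rw [hdisj w (List.mem_cons_of_mem _ hw)]; simp)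
      · have : w.1 = uv.1 := by
          rcases h0 : uv.2.countP (chk uv.1) with _ | n
          · rw [h0] at hin; simp at hin
          · rw [h0] at hin; simpa using hin
        exact h1.1 (by rw [← this]; exact List.mem_map_of_mem hw)

-- ===== VERDICT (by name: the statement is the Claim_ definition above) =====
theorem find_exact_phrase_matches_spec : Claim_equal_find_exact_phrase_matches := by
  intro ii qw _ hpre
  obtain ⟨hne, hnd⟩ := hpre
  cases qw with
  | nil => exact absurd rfl hne
  | cons q0 qt =>
    rw [Spec_find_exact_phrase_matches, find_exact_phrase_matches, find_exact_phrase_matches_alt]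
    simp only [PySem.List.pyGet?_zero_cons]
    cases hg : (PySem.Dict.mk ii).get? q0 with
    | none => rfl
    | some inner =>
      simp only []
      congr 1
      have hmem : (q0, inner) ∈ ii := PySem.Dict.mem_items_of_get?_eq_some _ hg
      rw [pvFoldOuter (fun uv => pvCountB (pvShifted ii (q0 :: qt)) uv)
          (fun url pos => pvCheckA ii (q0 :: qt) url pos
            (PySem.List.pyRange 0 (PySem.List.len (PySem.List.slice (q0 :: qt) (some 1) none)) 1))
          inner (hnd (q0, inner) hmem)
          (fun uv _ => pvCount_eq ii q0 qt uv)
          PySem.Dict.empty (fun uv _ => rfl)]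
      rfl
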